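-- pv_equiv track=rewrite | github.com/sudhakar692/university-problem | main.py | solve
-- ===== SOURCE A (Python) =====
-- def solve(n):
--     ab = 4
--
--     invalid_ways = [0]*(n+1)
--
--     if n >= ab:
--         invalid_ways[ab] = 1
--
--     for i in range(ab+1, n+1):
--         invalid_ways[i] = invalid_ways[i-1] + invalid_ways[i-2] + \
--             invalid_ways[i-3] + invalid_ways[i-4]+(2**(i-ab))
--
--     no_of_valid_ways_to_attend = (2 ** n) - invalid_ways[n]
--
--     # Total no. of combinations in which I'll miss the ceremony because not present at last day
--     not_able_to_attend = (2 ** n) // 2 - \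
--         (invalid_ways[n] - invalid_ways[n-1])
--
--     # The probability that you will miss your graduation ceremony.
--     result = f"{not_able_to_attend}/{no_of_valid_ways_to_attend}"
--     return result
-- ===== SOURCE B (Python) =====
-- def solve(n):
--     # Let v(k) = number of valid ways for k days (2**k minus invalid ways).
--     # v satisfies the tetranacci recurrence v(k) = v(k-1)+v(k-2)+v(k-3)+v(k-4)
--     # with seeds v(-3), v(-2), v(-1), v(0) = 0, 0, 1, 1, and the answer is
--     # (v(n) - v(n-1)) / v(n).  Rolling 4-window, no list, no powers of two.
--     a, b, c, d = 0, 0, 1, 1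
--     for _ in range(n):
--         a, b, c, d = b, c, d, a + b + c + d
--     return f"{d - c}/{d}"
-- ===== Notes on version B (the rewrite author's own statement) =====
-- stated objective: simpler
-- what changed: Replaces A's full DP table of invalid counts plus a freshly built power of two in every loop step by a rolling four-element window of the tetranacci valid-way counts, using the identities not_able = v(n) - v(n-1) and valid = v(n); no list and no powers of two at all.
import Mathlib
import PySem

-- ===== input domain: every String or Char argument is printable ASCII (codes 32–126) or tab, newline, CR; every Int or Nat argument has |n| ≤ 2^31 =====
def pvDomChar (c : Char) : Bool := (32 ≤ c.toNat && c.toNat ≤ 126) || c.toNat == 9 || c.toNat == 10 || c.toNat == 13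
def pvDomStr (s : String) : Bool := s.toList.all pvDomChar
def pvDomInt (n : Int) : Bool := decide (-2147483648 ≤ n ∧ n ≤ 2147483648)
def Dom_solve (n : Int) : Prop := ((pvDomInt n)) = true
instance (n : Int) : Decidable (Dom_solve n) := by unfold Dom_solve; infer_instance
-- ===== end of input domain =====

-- B replaces A's DP table of invalid counts and powers of two by a rolling
-- 4-window of the tetranacci valid counts v(k), using not_able = v(n) - v(n-1).

-- ===== PORT A =====
def solve (n : Int) : String :=
  -- ab = 4 is inlined
  let iw : List Int := List.replicate (n + 1).toNat 0
  let iw := if n ≥ 4 then PySem.List.pySetD iw 4 1 else iw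
  let iw := (PySem.List.pyRange 5 (n + 1) 1).foldl
      (fun l i => PySem.List.pySetD l i
        (PySem.List.pyGetD l (i - 1) 0 + PySem.List.pyGetD l (i - 2) 0
          + PySem.List.pyGetD l (i - 3) 0 + PySem.List.pyGetD l (i - 4) 0
          + 2 ^ (i - 4).toNat)) iw
  -- 2 ** n: n ≥ 0 under Pre_solve
  let valid := 2 ^ n.toNat - PySem.List.pyGetD iw n 0
  let notAble := PySem.Int.floordiv (2 ^ n.toNat) 2
      - (PySem.List.pyGetD iw n 0 - PySem.List.pyGetD iw (n - 1) 0)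
  PySem.Int.toStr notAble ++ "/" ++ PySem.Int.toStr valid

-- ===== PORT B =====
def solve_alt (n : Int) : String :=
  let w := (PySem.List.pyRange 0 n 1).foldl
      (fun (w : Int × Int × Int × Int) _ =>
        (w.2.1, w.2.2.1, w.2.2.2, w.1 + w.2.1 + w.2.2.1 + w.2.2.2))
      (0, 0, 1, 1)
  PySem.Int.toStr (w.2.2.2 - w.2.2.1) ++ "/" ++ PySem.Int.toStr w.2.2.2

-- ===== PRECONDITION & SPEC =====
-- Pre_solve excludes n < 0, where A raises IndexError (the table is empty).
def Pre_solve (n : Int) : Prop := 0 ≤ n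
instance (n : Int) : Decidable (Pre_solve n) := by unfold Pre_solve; infer_instance
def pvWitness_solve : Int := 6

def Spec_solve (n : Int) (out : String) : Prop := out = solve_alt n
instance (n : Int) (out : String) : Decidable (Spec_solve n out) := by unfold Spec_solve; infer_instance

-- ===== CLAIM (what is proved, stated in full; the proofs are below) =====
def Claim_equal_solve : Prop := ∀ (n : Int), Dom_solve n → Pre_solve n → Spec_solve n (solve n)

-- ===== LEMMAS AND PROOFS =====

/-- A's invalid_ways table as a function. -/
def invA : Nat → Int
  | 0 => 0 | 1 => 0 | 2 => 0 | 3 => 0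
  | k + 4 => invA (k + 3) + invA (k + 2) + invA (k + 1) + invA k + 2 ^ k

/-- B's rolling window after k loop iterations. -/
def W : Nat → Int × Int × Int × Int
  | 0 => (0, 0, 1, 1)
  | k + 1 => ((W k).2.1, (W k).2.2.1, (W k).2.2.2,
      (W k).1 + (W k).2.1 + (W k).2.2.1 + (W k).2.2.2)

/-- Shifted valid-count sequence: Vs (k+3) = 2^k - invA k, with seeds 0,0,1. -/
def Vs : Nat → Int
  | 0 => 0 | 1 => 0 | 2 => 1
  | k + 3 => 2 ^ k - invA k

lemma W_eq (k : Nat) : W k = (Vs k, Vs (k + 1), Vs (k + 2), Vs (k + 3)) := by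
  induction k with
  | zero => simp [W, Vs, invA]
  | succ k ih =>
    rw [W, ih]
    refine Prod.ext rfl (Prod.ext rfl (Prod.ext rfl ?_))
    show Vs k + Vs (k + 1) + Vs (k + 2) + Vs (k + 3) = Vs (k + 4)
    match k with
    | 0 => simp [Vs, invA]
    | 1 => simp [Vs, invA]
    | 2 => simp [Vs, invA]
    | j + 3 =>
      show (2^j - invA j) + (2^(j+1) - invA (j+1)) + (2^(j+2) - invA (j+2))
          + (2^(j+3) - invA (j+3)) = 2^(j+4) - invA (j+4)
      rw [show invA (j+4) = invA (j+3) + invA (j+2) + invA (j+1) + invA j + 2^j from rfl]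
      ring

lemma B_fold (m : Nat) :
    (PySem.List.pyRange 0 (m : Int) 1).foldl
      (fun (w : Int × Int × Int × Int) _ =>
        (w.2.1, w.2.2.1, w.2.2.2, w.1 + w.2.1 + w.2.2.1 + w.2.2.2))
      (0, 0, 1, 1) = W m := by
  induction m with
  | zero => simp [PySem.List.pyRange_one_eq_nil, W]
  | succ m ih =>
    rw [show ((m + 1 : Nat) : Int) = (m : Int) + 1 by push_cast; ring,
        PySem.List.pyRange_one_succ_right (by exact_mod_cast Int.natCast_nonneg m),
        List.foldl_append, ih]
    rfl

/-- The partially-filled table after the loop has processed indices ≤ j. -/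
def pref (N j : Nat) : List Int :=
  (List.range (N + 1)).map (fun t => if t ≤ j then invA t else 0)

lemma invA_small {t : Nat} (h : t ≤ 3) : invA t = 0 := by
  interval_cases t <;> rfl

lemma pref_step (N j : Nat) (h4 : 4 ≤ j) (hj : j < N) :
    PySem.List.pySetD (pref N j) ((j : Int) + 1)
      (PySem.List.pyGetD (pref N j) ((j : Int) + 1 - 1) 0
        + PySem.List.pyGetD (pref N j) ((j : Int) + 1 - 2) 0
        + PySem.List.pyGetD (pref N j) ((j : Int) + 1 - 3) 0
        + PySem.List.pyGetD (pref N j) ((j : Int) + 1 - 4) 0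
        + 2 ^ (((j : Int) + 1 - 4).toNat)) = pref N (j + 1) := by
  obtain ⟨i, rfl⟩ : ∃ i, j = i + 4 := ⟨j - 4, by omega⟩
  have hget : ∀ (t : Nat), t ≤ i + 4 →
      PySem.List.pyGetD (pref N (i + 4)) ((t : Nat) : Int) 0 = invA t := by
    intro t ht
    rw [PySem.List.pyGetD_natCast]
    unfold pref
    rw [List.getD_eq_getElem?_getD]
    simp [show t < N + 1 by omega, ht]
  have e1 : ((i + 4 : Nat) : Int) + 1 - 1 = ((i + 4 : Nat) : Int) := by ring
  have e2 : ((i + 4 : Nat) : Int) + 1 - 2 = ((i + 3 : Nat) : Int) := by push_cast; ring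
  have e3 : ((i + 4 : Nat) : Int) + 1 - 3 = ((i + 2 : Nat) : Int) := by push_cast; ring
  have e4 : ((i + 4 : Nat) : Int) + 1 - 4 = ((i + 1 : Nat) : Int) := by push_cast; ring
  have e5 : ((i + 4 : Nat) : Int) + 1 = ((i + 5 : Nat) : Int) := by push_cast; ring
  rw [e1, e2, e3, e4, e5, hget _ (by omega), hget _ (by omega), hget _ (by omega),
      hget _ (by omega), PySem.List.pySetD_natCast, Int.toNat_natCast]
  have hv : invA (i + 4) + invA (i + 3) + invA (i + 2) + invA (i + 1) + 2 ^ (i + 1)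
      = invA (i + 5) := by
    rw [show invA (i + 5) = invA (i + 4) + invA (i + 3) + invA (i + 2) + invA (i + 1)
        + 2 ^ (i + 1) from rfl]
  rw [hv]
  unfold pref
  apply List.ext_getElem (by simp)
  intro t h1 h2
  simp only [List.getElem_set, List.getElem_map, List.getElem_range]
  by_cases he : i + 5 = t
  · simp [← he]
  · simp only [if_neg he]
    by_cases hle : t ≤ i + 4
    · rw [if_pos hle, if_pos (by omega)]
    · rw [if_neg hle, if_neg (by omega)]

lemma A_fold (N : Nat) : ∀ (m j : Nat), 4 ≤ j → j + m = N →
    (PySem.List.pyRange ((j : Int) + 1) ((N : Int) + 1) 1).foldl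
      (fun l i => PySem.List.pySetD l i
        (PySem.List.pyGetD l (i - 1) 0 + PySem.List.pyGetD l (i - 2) 0
          + PySem.List.pyGetD l (i - 3) 0 + PySem.List.pyGetD l (i - 4) 0
          + 2 ^ (i - 4).toNat)) (pref N j)
    = (List.range (N + 1)).map invA := by
  intro m
  induction m with
  | zero =>
    intro j h4 hj
    rw [PySem.List.pyRange_one_eq_nil (by omega)]
    simp only [List.foldl_nil, pref]
    apply List.map_congr_left
    intro t ht
    rw [List.mem_range] at ht
    simp [show t ≤ j by omega]
  | succ m ih =>
    intro j h4 hj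
    rw [PySem.List.pyRange_one_cons (by omega), List.foldl_cons, pref_step N j h4 (by omega)]
    have := ih (j + 1) (by omega) (by omega)
    rw [show ((j + 1 : Nat) : Int) + 1 = (j : Int) + 1 + 1 by push_cast; ring] at this
    exact this

lemma pref_init (N : Nat) :
    PySem.List.pySetD (List.replicate (N + 1) (0 : Int)) 4 1 = pref N 4 := by
  rw [show PySem.List.pySetD (List.replicate (N + 1) (0 : Int)) 4 1
      = (List.replicate (N + 1) (0 : Int)).set 4 1 by
    rw [PySem.List.pySetD_of_nonneg _ _ (by norm_num)]; rfl]
  unfold pref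
  apply List.ext_getElem (by simp)
  intro t h1 h2
  simp only [List.getElem_set, List.getElem_map, List.getElem_range, List.getElem_replicate]
  by_cases he : 4 = t
  · simp [← he, invA]
  · rw [if_neg he]
    by_cases hle : t ≤ 4
    · rw [if_pos hle, invA_small (by omega)]
    · rw [if_neg hle]

lemma getD_map_invA (N t : Nat) (ht : t ≤ N) :
    PySem.List.pyGetD ((List.range (N + 1)).map invA) ((t : Nat) : Int) 0 = invA t := by
  rw [PySem.List.pyGetD_natCast, List.getD_eq_getElem?_getD]
  simp [show t < N + 1 by omega]

lemma solve_big (N : Nat) (h : 4 ≤ N) : solve ((N : Int)) = solve_alt ((N : Int)) := by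
  unfold solve solve_alt
  simp only
  rw [show ((N : Int) + 1).toNat = N + 1 by omega]
  rw [if_pos (by exact_mod_cast by omega : (N : Int) ≥ 4)]
  rw [show (5 : Int) = ((4 : Nat) : Int) + 1 from rfl, pref_init N, A_fold N (N - 4) 4 (by omega) (by omega)]
  rw [show ((N : Int)).toNat = N by omega]
  rw [getD_map_invA N N (le_refl N)]
  rw [show (N : Int) - 1 = ((N - 1 : Nat) : Int) by omega]
  rw [getD_map_invA N (N - 1) (by omega)]
  rw [B_fold N, W_eq N]
  have hc : Vs (N + 2) = 2 ^ (N - 1) - invA (N - 1) := by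
    rw [show N + 2 = (N - 1) + 3 by omega]; rfl
  have hd : Vs (N + 3) = 2 ^ N - invA N := rfl
  simp only [hc, hd]
  have hdiv : PySem.Int.floordiv (2 ^ N) 2 = ((2 : Int)) ^ (N - 1) := by
    rw [show ((2 : Int)) ^ N = (((2 ^ N : Nat) : Int)) by push_cast; ring,
        show (2 : Int) = ((2 : Nat) : Int) from rfl, PySem.Int.floordiv_natCast]
    rw [show (2 : Nat) ^ N / 2 = 2 ^ (N - 1) by
      rw [show N = (N - 1) + 1 by omega, pow_succ]; simp]
    push_cast; ring
  have hpow : (2 : Int) ^ N = 2 ^ (N - 1) + 2 ^ (N - 1) := by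
    conv_lhs => rw [show N = (N - 1) + 1 by omega]
    rw [pow_succ]; ring
  have harg : PySem.Int.floordiv ((2 : Int) ^ N) 2 - (invA N - invA (N - 1))
      = (2 ^ N - invA N) - (2 ^ (N - 1) - invA (N - 1)) := by
    rw [hdiv, hpow]; ring
  rw [harg]

-- ===== VERDICT (by name: the statement is the Claim_ definition above) =====
theorem solve_spec : Claim_equal_solve := by
  intro n _ hpre
  unfold Spec_solve
  have h0 : (0 : Int) ≤ n := hpre
  obtain ⟨N, rfl⟩ : ∃ N : Nat, n = (N : Int) := ⟨n.toNat, by omega⟩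
  by_cases h : 4 ≤ N
  · exact solve_big N h
  · interval_cases N <;> decide
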